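-- pv_equiv track=rewrite | github.com/Else00/zed-jinja-universal | scripts/sync_zed_languages.py | split_path_suffixes
-- ===== SOURCE A (Python) =====
-- def dedupe_strings(items: list[str]) -> list[str]:
--     return list(dict.fromkeys(items))
--
-- def split_path_suffixes(path_suffixes: list[str]) -> tuple[list[str], list[str], list[str]]:
--     suffixes: list[str] = []
--     full_filenames: list[str] = []
--     other_patterns: list[str] = []
--
--     for raw_value in path_suffixes:
--         value = raw_value.strip()
--         if not value:
--             continue
--         if "/" in value:
--             other_patterns.append(value)
--             continue
--         if "*" in value:
--             if value.startswith("*.") and value.count("*") == 1: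
--                 suffixes.append(value)
--             else:
--                 other_patterns.append(value)
--             continue
--         if value.startswith("."):
--             suffixes.append(value)
--             continue
--         full_filenames.append(value)
--
--     return dedupe_strings(suffixes), dedupe_strings(full_filenames), dedupe_strings(other_patterns)
-- ===== SOURCE B (Python) =====
-- def _classify(value: str) -> str:
--     if "/" in value:
--         return "other"
--     if "*" in value:
--         return "suffix" if value.startswith("*.") and value.count("*") == 1 else "other"
--     if value.startswith("."):
--         return "suffix"
--     return "full"
--
-- def split_path_suffixes(path_suffixes: list[str]) -> tuple[list[str], list[str], list[str]]:
--     cats: dict[str, str] = {}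
--     for raw_value in path_suffixes:
--         value = raw_value.strip()
--         if value and value not in cats:
--             cats[value] = _classify(value)
--     return (
--         [v for v, c in cats.items() if c == "suffix"],
--         [v for v, c in cats.items() if c == "full"],
--         [v for v, c in cats.items() if c == "other"],
--     )
-- ===== Notes on version B (the rewrite author's own statement) =====
-- stated objective: simpler
-- what changed: Replaces A's three accumulator lists plus a separate dedupe_strings pass per list with one insertion-ordered dict mapping each first-seen stripped value to its category via a pure classifier; the dict dedupes as it goes, so dedupe_strings disappears and the three results are just filters of the dict items.
import Mathlib
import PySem

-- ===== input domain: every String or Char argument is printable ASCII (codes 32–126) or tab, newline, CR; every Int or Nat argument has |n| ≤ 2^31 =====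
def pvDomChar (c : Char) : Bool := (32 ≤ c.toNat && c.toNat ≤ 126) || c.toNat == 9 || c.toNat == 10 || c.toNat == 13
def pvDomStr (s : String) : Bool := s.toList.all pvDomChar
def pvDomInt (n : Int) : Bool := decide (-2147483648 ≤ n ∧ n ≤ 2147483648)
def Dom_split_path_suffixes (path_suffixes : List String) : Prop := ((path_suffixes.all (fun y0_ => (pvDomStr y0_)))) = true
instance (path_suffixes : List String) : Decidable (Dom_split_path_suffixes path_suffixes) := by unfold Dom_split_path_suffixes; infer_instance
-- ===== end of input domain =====

-- B replaces A's three category lists + per-list dedupe by one insertion-ordered dict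
-- (first-seen value ↦ its category via a pure classifier), then filters its keys: simpler, same results.

-- ===== PORT A =====
-- the body of A's for-loop (state: the three lists suffixes/full_filenames/other_patterns)
def pvStepA (acc : List String × List String × List String) (raw_value : String) :
    List String × List String × List String :=
  let value := PySem.Str.strip raw_value
  if value == "" then acc
  else if PySem.Str.isIn "/" value then (acc.1, acc.2.1, acc.2.2 ++ [value])
  else if PySem.Str.isIn "*" value then
    (if PySem.Str.startswith value "*." && (PySem.Str.count value "*" == 1) then
      (acc.1 ++ [value], acc.2.1, acc.2.2)
     else (acc.1, acc.2.1, acc.2.2 ++ [value]))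
  else if PySem.Str.startswith value "." then (acc.1 ++ [value], acc.2.1, acc.2.2)
  else (acc.1, acc.2.1 ++ [value], acc.2.2)

def split_path_suffixes (path_suffixes : List String) : List String × List String × List String :=
  let r := path_suffixes.foldl pvStepA ([], [], [])
  (PySem.List.dedup r.1, PySem.List.dedup r.2.1, PySem.List.dedup r.2.2)

-- ===== PORT B =====
-- Source B's _classify
def pvClassify (value : String) : String :=
  if PySem.Str.isIn "/" value then "other"
  else if PySem.Str.isIn "*" value then
    (if PySem.Str.startswith value "*." && (PySem.Str.count value "*" == 1) then "suffix" else "other")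
  else if PySem.Str.startswith value "." then "suffix"
  else "full"

-- the body of B's for-loop (state: the dict cats)
def pvStepB (d : PySem.Dict String String) (raw_value : String) : PySem.Dict String String :=
  let value := PySem.Str.strip raw_value
  if !(value == "") && !(d.contains value) then d.insert value (pvClassify value) else d

def split_path_suffixes_alt (path_suffixes : List String) : List String × List String × List String :=
  let cats := path_suffixes.foldl pvStepB PySem.Dict.empty
  ((cats.items.filter (fun p => p.2 == "suffix")).map (·.1),
   (cats.items.filter (fun p => p.2 == "full")).map (·.1),
   (cats.items.filter (fun p => p.2 == "other")).map (·.1))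

-- ===== PRECONDITION & SPEC =====
def Spec_split_path_suffixes (path_suffixes : List String) (out : List String × List String × List String) : Prop := out = split_path_suffixes_alt path_suffixes
instance (path_suffixes : List String) (out : List String × List String × List String) : Decidable (Spec_split_path_suffixes path_suffixes out) := by unfold Spec_split_path_suffixes; infer_instance

-- ===== CLAIM (what is proved, stated in full; the proofs are below) =====
def Claim_equal_split_path_suffixes : Prop := ∀ (path_suffixes : List String), Dom_split_path_suffixes path_suffixes → Spec_split_path_suffixes path_suffixes (split_path_suffixes path_suffixes)

-- ===== LEMMAS AND PROOFS =====

-- the stripped non-empty values, in order (the values both loops actually process)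
def pvVals (l : List String) : List String :=
  (l.map PySem.Str.strip).filter (fun v => !(v == ""))

theorem pvVals_cons (x : String) (t : List String) :
    pvVals (x :: t) =
      if PySem.Str.strip x == "" then pvVals t else PySem.Str.strip x :: pvVals t := by
  by_cases h : PySem.Str.strip x == "" <;> simp [pvVals, h]

-- first-occurrence dedup with an explicit "seen" accumulator
def pvDedupSeen (xs seen : List String) : List String :=
  match xs with
  | [] => []
  | x :: t => if x ∈ seen then pvDedupSeen t seen else x :: pvDedupSeen t (seen ++ [x])

theorem pvFoldlAdd_eq (xs : List String) : ∀ (seen : List String),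
    xs.foldl PySem.Set.add seen = seen ++ pvDedupSeen xs seen := by
  induction xs with
  | nil => intro seen; simp [pvDedupSeen]
  | cons x t ih =>
    intro seen
    simp only [List.foldl_cons, pvDedupSeen, PySem.Set.add]
    by_cases h : x ∈ seen
    · simp [h, ih]
    · simp [h, ih]

theorem pvDedup_eq (xs : List String) : PySem.List.dedup xs = pvDedupSeen xs [] := by
  simpa [PySem.List.dedup, PySem.Set.ofList, PySem.Set.empty] using pvFoldlAdd_eq xs []

theorem pvDedupSeen_filter (p : String → Bool) (xs : List String) : ∀ (seen : List String),
    pvDedupSeen (xs.filter p) (seen.filter p) = (pvDedupSeen xs seen).filter p := by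
  induction xs with
  | nil => intro seen; simp [pvDedupSeen]
  | cons x t ih =>
    intro seen
    by_cases hp : p x
    · have hsx : (seen ++ [x]).filter p = seen.filter p ++ [x] := by
        simp [List.filter_append, hp]
      by_cases hm : x ∈ seen
      · have hm' : x ∈ seen.filter p := List.mem_filter.mpr ⟨hm, hp⟩
        simp [pvDedupSeen, hp, hm, hm', ih]
      · have hm' : x ∉ seen.filter p := fun h => hm (List.mem_filter.mp h).1
        have h2 := ih (seen ++ [x])
        rw [hsx] at h2
        simp [pvDedupSeen, hp, hm, hm', h2]
    · have hsx : (seen ++ [x]).filter p = seen.filter p := by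
        simp [List.filter_append, hp]
      by_cases hm : x ∈ seen
      · simp [pvDedupSeen, hp, hm, ih]
      · have h2 := ih (seen ++ [x])
        rw [hsx] at h2
        simp [pvDedupSeen, hp, hm, h2]

-- A's loop produces the three category filters of pvVals, appended to the accumulators
theorem pvLoopA (l : List String) : ∀ (s f o : List String),
    l.foldl pvStepA (s, f, o)
    = (s ++ (pvVals l).filter (fun v => pvClassify v == "suffix"),
       f ++ (pvVals l).filter (fun v => pvClassify v == "full"),
       o ++ (pvVals l).filter (fun v => pvClassify v == "other")) := by
  induction l with
  | nil => intro s f o; simp [pvVals]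
  | cons x t ih =>
    intro s f o
    rw [List.foldl_cons, pvVals_cons]
    by_cases h0 : PySem.Str.strip x == ""
    · have hstep : pvStepA (s, f, o) x = (s, f, o) := by simp [pvStepA, h0]
      rw [hstep, if_pos h0, ih]
    · rw [if_neg h0]
      by_cases h1 : PySem.Str.isIn "/" (PySem.Str.strip x)
      · have hstep : pvStepA (s, f, o) x = (s, f, o ++ [PySem.Str.strip x]) := by
          simp only [pvStepA]; rw [if_neg (by simpa using h0), if_pos h1]
        have hcl : pvClassify (PySem.Str.strip x) = "other" := by
          simp only [pvClassify]; rw [if_pos h1]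
        rw [hstep, ih]
        simp [hcl]
      · by_cases h2 : PySem.Str.isIn "*" (PySem.Str.strip x)
        · by_cases h3 : PySem.Str.startswith (PySem.Str.strip x) "*." &&
              (PySem.Str.count (PySem.Str.strip x) "*" == 1)
          · have hstep : pvStepA (s, f, o) x = (s ++ [PySem.Str.strip x], f, o) := by
              simp only [pvStepA]
              rw [if_neg (by simpa using h0), if_neg h1, if_pos h2, if_pos h3]
            have hcl : pvClassify (PySem.Str.strip x) = "suffix" := by
              simp only [pvClassify]; rw [if_neg h1, if_pos h2, if_pos h3]
            rw [hstep, ih]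
            simp [hcl]
          · have hstep : pvStepA (s, f, o) x = (s, f, o ++ [PySem.Str.strip x]) := by
              simp only [pvStepA]
              rw [if_neg (by simpa using h0), if_neg h1, if_pos h2, if_neg h3]
            have hcl : pvClassify (PySem.Str.strip x) = "other" := by
              simp only [pvClassify]; rw [if_neg h1, if_pos h2, if_neg h3]
            rw [hstep, ih]
            simp [hcl]
        · by_cases h4 : PySem.Str.startswith (PySem.Str.strip x) "."
          · have hstep : pvStepA (s, f, o) x = (s ++ [PySem.Str.strip x], f, o) := by
              simp only [pvStepA]
              rw [if_neg (by simpa using h0), if_neg h1, if_neg h2, if_pos h4]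
            have hcl : pvClassify (PySem.Str.strip x) = "suffix" := by
              simp only [pvClassify]; rw [if_neg h1, if_neg h2, if_pos h4]
            rw [hstep, ih]
            simp [hcl]
          · have hstep : pvStepA (s, f, o) x = (s, f ++ [PySem.Str.strip x], o) := by
              simp only [pvStepA]
              rw [if_neg (by simpa using h0), if_neg h1, if_neg h2, if_neg h4]
            have hcl : pvClassify (PySem.Str.strip x) = "full" := by
              simp only [pvClassify]; rw [if_neg h1, if_neg h2, if_neg h4]
            rw [hstep, ih]
            simp [hcl]

-- B's loop: the dict items are the first occurrences of pvVals paired with their category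
theorem pvLoopB (l : List String) : ∀ (d : PySem.Dict String String), d.keys.Nodup →
    (l.foldl pvStepB d).items
    = d.items ++ (pvDedupSeen (pvVals l) d.keys).map (fun v => (v, pvClassify v)) := by
  induction l with
  | nil => intro d _; simp [pvVals, pvDedupSeen]
  | cons x t ih =>
    intro d hnd
    rw [List.foldl_cons, pvVals_cons]
    by_cases h0 : PySem.Str.strip x == ""
    · have hstep : pvStepB d x = d := by simp [pvStepB, h0]
      rw [hstep, if_pos h0, ih d hnd]
    · rw [if_neg h0]
      by_cases hc : d.contains (PySem.Str.strip x)
      · have hstep : pvStepB d x = d := by simp [pvStepB, hc]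
        have hmem : PySem.Str.strip x ∈ d.keys := (PySem.Dict.contains_iff_mem_keys d _).mp hc
        rw [hstep, ih d hnd]
        simp [pvDedupSeen, hmem]
      · have hc' : d.contains (PySem.Str.strip x) = false := by simpa using hc
        have hstep : pvStepB d x = d.insert (PySem.Str.strip x) (pvClassify (PySem.Str.strip x)) := by
          simp [pvStepB, h0, hc']
        have hmem : PySem.Str.strip x ∉ d.keys := fun h =>
          hc ((PySem.Dict.contains_iff_mem_keys d _).mpr h)
        have hnd' := PySem.Dict.nodup_keys_insert d (PySem.Str.strip x)
          (pvClassify (PySem.Str.strip x)) hnd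
        have h2 := ih _ hnd'
        rw [PySem.Dict.keys_insert_of_not_contains d _ hc',
            PySem.Dict.items_insert_of_not_contains d _ hc'] at h2
        rw [hstep, h2]
        simp [pvDedupSeen, hmem]

-- ===== VERDICT (by name: the statement is the Claim_ definition above) =====
theorem split_path_suffixes_spec : Claim_equal_split_path_suffixes := by
  intro path_suffixes _
  unfold Spec_split_path_suffixes
  show (PySem.List.dedup (path_suffixes.foldl pvStepA ([], [], [])).1,
        PySem.List.dedup (path_suffixes.foldl pvStepA ([], [], [])).2.1,
        PySem.List.dedup (path_suffixes.foldl pvStepA ([], [], [])).2.2)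
      = (((path_suffixes.foldl pvStepB PySem.Dict.empty).items.filter (fun p => p.2 == "suffix")).map (·.1),
         ((path_suffixes.foldl pvStepB PySem.Dict.empty).items.filter (fun p => p.2 == "full")).map (·.1),
         ((path_suffixes.foldl pvStepB PySem.Dict.empty).items.filter (fun p => p.2 == "other")).map (·.1))
  rw [pvLoopA path_suffixes [] [] [],
      pvLoopB path_suffixes PySem.Dict.empty PySem.Dict.nodup_keys_empty]
  have hkeys : (PySem.Dict.empty : PySem.Dict String String).keys = [] := rfl
  have hitems : (PySem.Dict.empty : PySem.Dict String String).items = [] := rfl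
  rw [hkeys, hitems]
  have hd : ∀ (c : String),
      PySem.Set.ofList ((pvVals path_suffixes).filter (fun v => pvClassify v == c))
      = (pvDedupSeen (pvVals path_suffixes) []).filter (fun v => pvClassify v == c) := by
    intro c
    rw [← PySem.List.dedup_eq_ofList, pvDedup_eq]
    simpa using pvDedupSeen_filter (fun v => pvClassify v == c) (pvVals path_suffixes) []
  simp only [List.nil_append, List.filter_map, List.map_map]
  refine Prod.ext ?_ (Prod.ext ?_ ?_) <;>
    simp [hd, Function.comp_def]
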